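-- pv_equiv track=rewrite | github.com/nett00n/hyprlandRPM | scripts/sort-yaml-lists.py | _collect_dict_block
-- ===== SOURCE A (Python) =====
-- def _collect_dict_block(
--     lines: list[str], i: int, min_indent: int
-- ) -> tuple[list[str], list[str], int]:
--     """Collect dict block lines stopping only at non-blank dedented lines.
--
--     Returns (body_lines, trailing_blank_lines, next_i).
--     Blank lines inside block scalars are included in the body; trailing blank
--     lines (between this block and the next sibling) are returned separately.
--     """
--     block: list[str] = []
--     while i < len(lines):
--         cur = lines[i]
--         raw = cur.rstrip("\n")
--         if raw and len(raw) - len(raw.lstrip()) < min_indent: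
--             break
--         block.append(cur)
--         i += 1
--     # Separate trailing blank lines so they're emitted after the sorted body.
--     trailing: list[str] = []
--     while block and not block[-1].rstrip("\n"):
--         trailing.insert(0, block.pop())
--     return block, trailing, i
-- ===== SOURCE B (Python) =====
-- def _collect_dict_block(
--     lines: list[str], i: int, min_indent: int
-- ) -> tuple[list[str], list[str], int]:
--     """Index-based rewrite: find the stop index j, walk k back over the blank
--     suffix, and return slices of `lines` -- no list building, popping or
--     insert(0)."""
--     n = len(lines)
--     j = i
--     while j < n:
--         raw = lines[j].rstrip("\n")
--         if raw and len(raw) - len(raw.lstrip()) < min_indent: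
--             break
--         j += 1
--     k = j
--     while k > i and not lines[k - 1].rstrip("\n"):
--         k -= 1
--     return lines[i:k], lines[k:j], j
-- ===== Notes on version B (the rewrite author's own statement) =====
-- stated objective: alternative
-- what changed: B replaces A's build-then-pop approach (append lines to a block list, then pop blank lines off its end into trailing with insert(0)) by pure index arithmetic: it finds the stop index j, walks an index k back over the blank suffix, and returns the slices lines[i:k] and lines[k:j].
-- outside the precondition, e.g. on _collect_dict_block(['', ''], -1, 1): A returns ([], ['', '', ''], 2), B returns ([], [''], 2)
import Mathlib
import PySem

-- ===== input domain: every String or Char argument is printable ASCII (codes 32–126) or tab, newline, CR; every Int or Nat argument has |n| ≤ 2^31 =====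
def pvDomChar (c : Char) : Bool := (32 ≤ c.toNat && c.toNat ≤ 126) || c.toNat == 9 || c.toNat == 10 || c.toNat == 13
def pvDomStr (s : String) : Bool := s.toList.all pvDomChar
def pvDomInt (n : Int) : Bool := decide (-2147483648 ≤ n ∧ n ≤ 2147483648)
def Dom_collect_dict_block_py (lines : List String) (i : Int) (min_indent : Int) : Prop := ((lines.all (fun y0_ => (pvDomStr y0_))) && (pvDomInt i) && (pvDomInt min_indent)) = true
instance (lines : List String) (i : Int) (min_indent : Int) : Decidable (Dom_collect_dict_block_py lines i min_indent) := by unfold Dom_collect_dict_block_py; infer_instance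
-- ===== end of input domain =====

-- B slices `lines` by two computed indices instead of A's append-then-pop block list; return value only, same cost.

-- shared exact ports of the Python expressions both versions use on a line:
-- cur.rstrip("\n")  (hand port, exact: drops trailing '\n' characters only)
def pvRstripNl (s : String) : String := String.ofList ((s.toList.reverse.dropWhile (fun c => c == '\n')).reverse)
-- 'not raw' for raw = cur.rstrip("\n")
def pvBlank (s : String) : Bool := (pvRstripNl s).toList.isEmpty
-- 'raw and len(raw) - len(raw.lstrip()) < min_indent'
def pvStop (min_indent : Int) (cur : String) : Bool :=
  let raw := pvRstripNl cur
  !(raw.toList.isEmpty) && decide (PySem.Str.len raw - PySem.Str.len (PySem.Str.lstrip raw) < min_indent)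

-- ===== PORT A =====
-- the 'while i < len(lines)' collection loop (block is the accumulator)
def pvAcollect (lines : List String) (min_indent : Int) (i : Int) (block : List String) :
    List String × Int :=
  if _h : i < (lines.length : Int) then
    let cur := (PySem.List.pyGet? lines i).getD ""
    if pvStop min_indent cur then (block, i)
    else pvAcollect lines min_indent (i + 1) (block ++ [cur])
  else (block, i)
termination_by ((lines.length : Int) - i).toNat
decreasing_by omega

-- the 'while block and not block[-1].rstrip("\n")' pop loop
def pvAtrail (block : List String) (trailing : List String) : List String × List String :=
  match _h : block.getLast? with
  | none => (block, trailing)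
  | some last =>
      if pvBlank last then pvAtrail block.dropLast (last :: trailing)
      else (block, trailing)
termination_by block.length
decreasing_by
  have : block ≠ [] := by intro hnil; simp [hnil] at _h
  have h1 : block.dropLast.length = block.length - 1 := by simp
  have h2 : 0 < block.length := List.length_pos_iff.mpr this
  omega

def collect_dict_block_py (lines : List String) (i : Int) (min_indent : Int) :
    List String × List String × Int :=
  let r := pvAcollect lines min_indent i []
  let bt := pvAtrail r.1 []
  (bt.1, bt.2, r.2)

-- ===== PORT B =====
-- 'while j < n: … j += 1' : first index whose line is non-blank and dedented
def pvBstop (lines : List String) (min_indent : Int) (j : Int) : Int :=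
  if _h : j < (lines.length : Int) then
    if pvStop min_indent ((PySem.List.pyGet? lines j).getD "") then j
    else pvBstop lines min_indent (j + 1)
  else j
termination_by ((lines.length : Int) - j).toNat
decreasing_by omega

-- 'while k > i and not lines[k-1].rstrip("\n"): k -= 1'
def pvBback (lines : List String) (i : Int) (k : Int) : Int :=
  if i < k ∧ pvBlank ((PySem.List.pyGet? lines (k - 1)).getD "") then
    pvBback lines i (k - 1)
  else k
termination_by (k - i).toNat
decreasing_by omega

def collect_dict_block_py_alt (lines : List String) (i : Int) (min_indent : Int) :
    List String × List String × Int :=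
  let j := pvBstop lines min_indent i
  let k := pvBback lines i j
  (PySem.List.slice lines (some i) (some k), PySem.List.slice lines (some k) (some j), j)

-- ===== PRECONDITION & SPEC =====
-- Pre_ restricts to the natural domain 0 ≤ i (i is a scan position): for i < -len(lines) A raises
-- IndexError, and for -len(lines) ≤ i < 0 A's negative-index wraparound re-reads lines already behind
-- the cursor (an artefact B's forward slices need not match; see the cite in claim.json).
def Pre_collect_dict_block_py (lines : List String) (i : Int) (min_indent : Int) : Prop := 0 ≤ i
instance (lines : List String) (i : Int) (min_indent : Int) : Decidable (Pre_collect_dict_block_py lines i min_indent) := by unfold Pre_collect_dict_block_py; infer_instance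

def pvWitness_collect_dict_block_py : List String × Int × Int := (["a: 1\n", "  b: 2\n", "\n", "c: 3\n"], 1, 1)

def Spec_collect_dict_block_py (lines : List String) (i : Int) (min_indent : Int) (out : List String × List String × Int) : Prop := out = collect_dict_block_py_alt lines i min_indent
instance (lines : List String) (i : Int) (min_indent : Int) (out : List String × List String × Int) : Decidable (Spec_collect_dict_block_py lines i min_indent out) := by unfold Spec_collect_dict_block_py; infer_instance

-- ===== CLAIM (what is proved, stated in full; the proofs are below) =====
def Claim_equal_collect_dict_block_py : Prop := ∀ (lines : List String) (i : Int) (min_indent : Int), Dom_collect_dict_block_py lines i min_indent → Pre_collect_dict_block_py lines i min_indent → Spec_collect_dict_block_py lines i min_indent (collect_dict_block_py lines i min_indent)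

-- ===== LEMMAS AND PROOFS =====

theorem pvAcollect_append_aux (lines : List String) (mi : Int) :
    ∀ (m : Nat) (i : Int) (block : List String), ((lines.length : Int) - i).toNat ≤ m →
    pvAcollect lines mi i block = (block ++ (pvAcollect lines mi i []).1, (pvAcollect lines mi i []).2) := by
  intro m
  induction m with
  | zero =>
    intro i block h
    rw [pvAcollect]
    conv_rhs => rw [pvAcollect]
    have hi : ¬ (i < (lines.length : Int)) := by omega
    simp [hi]
  | succ m ih =>
    intro i block h
    rw [pvAcollect]
    conv_rhs => rw [pvAcollect]
    by_cases hi : i < (lines.length : Int)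
    · simp only [hi, dif_pos]
      by_cases hs : pvStop mi ((PySem.List.pyGet? lines i).getD "")
      · simp [hs]
      · simp only [hs, if_neg, Bool.false_eq_true, not_false_iff]
        rw [ih (i+1) _ (by omega)]
        conv_rhs => rw [List.nil_append, ih (i+1) [(PySem.List.pyGet? lines i).getD ""] (by omega)]
        simp
    · simp [hi]

theorem pvAcollect_append (lines : List String) (mi : Int) (i : Int) (block : List String) :
    pvAcollect lines mi i block = (block ++ (pvAcollect lines mi i []).1, (pvAcollect lines mi i []).2) :=
  pvAcollect_append_aux lines mi _ i block le_rfl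

theorem pvBstop_ge (lines : List String) (mi : Int) (j : Int) (h : (lines.length : Int) ≤ j) :
    pvBstop lines mi j = j := by
  rw [pvBstop]; have : ¬ (j < (lines.length : Int)) := by omega
  simp [this]

theorem pvBstop_bounds_aux (lines : List String) (mi : Int) :
    ∀ (m : Nat) (a : Nat), lines.length ≤ a + m → a ≤ lines.length →
    ∃ j : Nat, pvBstop lines mi (a : Int) = (j : Int) ∧ a ≤ j ∧ j ≤ lines.length := by
  intro m
  induction m with
  | zero =>
    intro a h ha
    exact ⟨a, pvBstop_ge lines mi a (by omega), le_rfl, ha⟩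
  | succ m ih =>
    intro a h ha
    by_cases hi : (a : Int) < (lines.length : Int)
    · rw [pvBstop]
      simp only [hi, dif_pos]
      by_cases hs : pvStop mi ((PySem.List.pyGet? lines (a : Int)).getD "")
      · exact ⟨a, by simp only [hs, if_pos], le_rfl, ha⟩
      · obtain ⟨j, hj, h1, h2⟩ := ih (a+1) (by omega) (by omega)
        refine ⟨j, ?_, by omega, h2⟩
        simp only [hs, if_neg, Bool.false_eq_true, not_false_iff]
        rw [← hj]; norm_num
    · exact ⟨a, pvBstop_ge lines mi a (by omega), le_rfl, ha⟩

theorem pvBstop_bounds (lines : List String) (mi : Int) (a : Nat) (ha : a ≤ lines.length) :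
    ∃ j : Nat, pvBstop lines mi (a : Int) = (j : Int) ∧ a ≤ j ∧ j ≤ lines.length :=
  pvBstop_bounds_aux lines mi lines.length a (by omega) ha

theorem pv_slice_self (lines : List String) (a : Nat) :
    PySem.List.slice lines (some (a : Int)) (some (a : Int)) = [] := by
  simp [PySem.List.slice_natCast]

theorem pv_slice_cons (lines : List String) (a j : Nat) (ha : a < lines.length) (hj : a < j) :
    PySem.List.slice lines (some (a : Int)) (some (j : Int)) =
      lines[a] :: PySem.List.slice lines (some ((a+1 : Nat) : Int)) (some (j : Int)) := by
  rw [PySem.List.slice_natCast, PySem.List.slice_natCast, List.drop_eq_getElem_cons ha]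
  have : j - a = (j - (a+1)) + 1 := by omega
  rw [this, List.take_succ_cons]

theorem pvAcollect_eq_slice_aux (lines : List String) (mi : Int) :
    ∀ (m : Nat) (a : Nat), lines.length ≤ a + m →
    pvAcollect lines mi (a : Int) [] =
      (PySem.List.slice lines (some (a : Int)) (some (pvBstop lines mi (a : Int))),
       pvBstop lines mi (a : Int)) := by
  intro m
  induction m with
  | zero =>
    intro a h
    have hi : ¬ ((a : Int) < (lines.length : Int)) := by omega
    rw [pvAcollect, pvBstop]
    simp [hi, pv_slice_self]
  | succ m ih =>
    intro a h
    by_cases hi : (a : Int) < (lines.length : Int)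
    · rw [pvAcollect]
      conv_rhs => rw [pvBstop]
      simp only [hi, dif_pos]
      by_cases hs : pvStop mi ((PySem.List.pyGet? lines (a : Int)).getD "")
      · simp only [hs, if_pos, pv_slice_self]
      · simp only [hs, if_neg, Bool.false_eq_true, not_false_iff]
        rw [pvAcollect_append, List.nil_append]
        have hcast : ((a : Int) + 1) = ((a + 1 : Nat) : Int) := by push_cast; ring
        rw [hcast, ih (a+1) (by omega)]
        have han : a < lines.length := by exact_mod_cast hi
        obtain ⟨j, hj, h1, h2⟩ := pvBstop_bounds lines mi (a+1) (by omega)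
        rw [hj]
        have hget : ((PySem.List.pyGet? lines (a : Int)).getD "") = lines[a] := by
          simp [PySem.List.pyGet?_natCast, List.getElem?_eq_getElem han]
        rw [hget, pv_slice_cons lines a j han (by omega)]
        simp
    · have hge : (lines.length : Int) ≤ (a : Int) := by omega
      rw [pvAcollect, pvBstop_ge lines mi _ hge]
      simp [hi, pv_slice_self]

theorem pv_slice_getLast (lines : List String) (a k : Nat) (h1 : a < k) (h2 : k ≤ lines.length) :
    (PySem.List.slice lines (some (a : Int)) (some (k : Int))).getLast? = some (lines[k-1]'(by omega)) := by
  rw [PySem.List.slice_natCast, List.getLast?_eq_getElem?]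
  rw [List.length_take, List.length_drop]
  have hm : min (k - a) (lines.length - a) = k - a := by omega
  rw [hm, List.getElem?_take_of_lt (by omega), List.getElem?_drop]
  rw [List.getElem?_eq_getElem (by omega)]
  congr 1
  congr 1
  omega

theorem pv_slice_dropLast (lines : List String) (a k : Nat) (h1 : a < k) (h2 : k ≤ lines.length) :
    (PySem.List.slice lines (some (a : Int)) (some (k : Int))).dropLast =
      PySem.List.slice lines (some (a : Int)) (some ((k-1 : Nat) : Int)) := by
  rw [PySem.List.slice_natCast, PySem.List.slice_natCast, List.dropLast_eq_take]
  rw [List.length_take, List.length_drop, List.take_take]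
  congr 1
  omega

theorem pv_slice_append_last (lines : List String) (c d : Nat) (h1 : c ≤ d) (h2 : d < lines.length) :
    PySem.List.slice lines (some (c : Int)) (some (d : Int)) ++ [lines[d]] =
      PySem.List.slice lines (some (c : Int)) (some ((d+1 : Nat) : Int)) := by
  rw [PySem.List.slice_natCast, PySem.List.slice_natCast]
  have : d + 1 - c = (d - c) + 1 := by omega
  rw [this, List.take_add_one]
  congr 1
  rw [List.getElem?_drop, List.getElem?_eq_getElem (by omega)]
  simp
  congr 1
  omega

theorem pvBback_stop (lines : List String) (i k : Int)
    (h : ¬ (i < k ∧ pvBlank ((PySem.List.pyGet? lines (k - 1)).getD "") = true)) :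
    pvBback lines i k = k := by
  rw [pvBback]; simp only [h, if_neg, not_false_iff]

theorem pvAtrail_eq_back_aux (lines : List String) (a : Nat) :
    ∀ (m : Nat) (k : Nat), k ≤ a + m → a ≤ k → k ≤ lines.length → ∀ (T : List String),
    ∃ k' : Nat, pvBback lines (a : Int) (k : Int) = (k' : Int) ∧ a ≤ k' ∧ k' ≤ k ∧
      pvAtrail (PySem.List.slice lines (some (a : Int)) (some (k : Int))) T =
        (PySem.List.slice lines (some (a : Int)) (some (k' : Int)),
         PySem.List.slice lines (some (k' : Int)) (some (k : Int)) ++ T) := by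
  intro m
  induction m with
  | zero =>
    intro k hm h1 h2 T
    have hk : k = a := by omega
    subst hk
    refine ⟨k, pvBback_stop lines _ _ (by simp), le_rfl, le_rfl, ?_⟩
    rw [pvAtrail]
    split
    · simp [pv_slice_self]
    · next last hl =>
        rw [pv_slice_self] at hl
        simp at hl
  | succ m ih =>
    intro k hm h1 h2 T
    by_cases hak : a < k
    · have hlast := pv_slice_getLast lines a k hak h2
      by_cases hb : pvBlank (lines[k-1]'(by omega))
      · -- pop / step down
        have hget : ((PySem.List.pyGet? lines ((k : Int) - 1)).getD "") = lines[k-1]'(by omega) := by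
          have hc : ((k : Int) - 1) = ((k - 1 : Nat) : Int) := by omega
          rw [hc]
          simp [PySem.List.pyGet?_natCast, List.getElem?_eq_getElem (show k-1 < lines.length by omega)]
        obtain ⟨k', hk', ha', hk'k, htr⟩ := ih (k-1) (by omega) (by omega) (by omega) ((lines[k-1]'(by omega)) :: T)
        refine ⟨k', ?_, ha', by omega, ?_⟩
        · rw [pvBback]
          have hcond : ((a : Int) < (k : Int) ∧ pvBlank ((PySem.List.pyGet? lines ((k : Int) - 1)).getD "") = true) := by
            refine ⟨by exact_mod_cast hak, by rw [hget]; exact hb⟩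
          rw [if_pos hcond]
          have hc : ((k : Int) - 1) = ((k - 1 : Nat) : Int) := by omega
          rw [hc, hk']
        · rw [pvAtrail]
          rw [hlast]
          simp only [hb, if_pos]
          rw [pv_slice_dropLast lines a k hak h2, htr]
          refine Prod.ext rfl ?_
          simp only
          rw [List.append_cons, pv_slice_append_last lines k' (k-1) (by omega) (by omega)]
          have hkk : (k - 1) + 1 = k := by omega
          rw [hkk]
      · -- non-blank last: both stop
        refine ⟨k, ?_, by omega, le_rfl, ?_⟩
        · refine pvBback_stop lines _ _ ?_
          rintro ⟨-, hbl⟩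
          have hget : ((PySem.List.pyGet? lines ((k : Int) - 1)).getD "") = lines[k-1]'(by omega) := by
            have hc : ((k : Int) - 1) = ((k - 1 : Nat) : Int) := by omega
            rw [hc]
            simp [PySem.List.pyGet?_natCast, List.getElem?_eq_getElem (show k-1 < lines.length by omega)]
          rw [hget] at hbl
          exact hb hbl
        · rw [pvAtrail, hlast]
          simp only [hb, if_neg, Bool.false_eq_true, not_false_iff]
          rw [pv_slice_self]
          simp
    · have hk : k = a := by omega
      subst hk
      refine ⟨k, pvBback_stop lines _ _ (by simp), le_rfl, le_rfl, ?_⟩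
      rw [pvAtrail]
      split
      · simp [pv_slice_self]
      · next last hl =>
          rw [pv_slice_self] at hl
          simp at hl

-- ===== VERDICT (by name: the statement is the Claim_ definition above) =====
theorem collect_dict_block_py_spec : Claim_equal_collect_dict_block_py := by
  intro lines i mi _ hpre
  unfold Spec_collect_dict_block_py
  have h0 : 0 ≤ i := hpre
  lift i to Nat using h0 with a
  unfold collect_dict_block_py collect_dict_block_py_alt
  by_cases hlen : a ≤ lines.length
  · rw [pvAcollect_eq_slice_aux lines mi lines.length a (by omega)]
    obtain ⟨j, hj, h1, h2⟩ := pvBstop_bounds lines mi a hlen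
    obtain ⟨k', hk', ha', hk'j, htr⟩ :=
      pvAtrail_eq_back_aux lines a lines.length j (by omega) h1 h2 []
    simp only [hj, htr]
    rw [hk']
    simp
  · have hge : (lines.length : Int) ≤ (a : Int) := by exact_mod_cast (by omega : lines.length ≤ a)
    have hni : ¬ ((a : Int) < (lines.length : Int)) := by omega
    rw [pvBstop_ge lines mi _ hge]
    rw [pvAcollect]
    simp only [hni, dif_neg, not_false_iff]
    rw [pvBback_stop lines _ _ (by simp)]
    rw [pvAtrail]
    split
    · simp [pv_slice_self]
    · next last hl => simp at hl
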